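-- pv_equiv track=rewrite | github.com/noorearafin/Specwright | scope.py | apply_scope
-- ===== SOURCE A (Python) =====
-- def apply_scope(cases: list[dict], scope: dict) -> list[dict]:
--     """Filter cases by scope dict. Always drops non-automatable cases.
--
--     Each key in scope is optional. Omitting a key means "no filter on that
--     dimension". An empty scope ({}) returns all automatable cases.
--     """
--     # Non-automatable cases (manual, CAPTCHAs, real-inbox checks) are always
--     # excluded — Playwright cannot run them regardless of scope.
--     out = [c for c in cases if c.get("automatable", True)]
--
--     # Apply each dimension only when the scope explicitly specifies it
--     if scope.get("priorities"):
--         s = set(scope["priorities"])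
--         out = [c for c in out if c.get("priority") in s]
--
--     if scope.get("types"):
--         s = set(scope["types"])
--         out = [c for c in out if c.get("type") in s]
--
--     if scope.get("targets"):
--         s = set(scope["targets"])
--         out = [c for c in out if c.get("target") in s]
--
--     return out
-- ===== SOURCE B (Python) =====
-- def apply_scope(cases: list[dict], scope: dict) -> list[dict]:
--     """Filter cases by scope dict in one pass: precompute the active filter
--     set (or None) per dimension, then a single comprehension tests them all."""
--     prios = set(scope["priorities"]) if scope.get("priorities") else None
--     types = set(scope["types"]) if scope.get("types") else None
--     targets = set(scope["targets"]) if scope.get("targets") else None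
--     return [
--         c for c in cases
--         if c.get("automatable", True)
--         and (prios is None or c.get("priority") in prios)
--         and (types is None or c.get("type") in types)
--         and (targets is None or c.get("target") in targets)
--     ]
-- ===== Notes on version B (the rewrite author's own statement) =====
-- stated objective: simpler
-- what changed: Replaces A's four sequential list rebuilds (one base pass plus up to three conditional filter passes) with a single traversal that precomputes the active filter set per dimension once and tests all dimensions per element in one comprehension.
import Mathlib
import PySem

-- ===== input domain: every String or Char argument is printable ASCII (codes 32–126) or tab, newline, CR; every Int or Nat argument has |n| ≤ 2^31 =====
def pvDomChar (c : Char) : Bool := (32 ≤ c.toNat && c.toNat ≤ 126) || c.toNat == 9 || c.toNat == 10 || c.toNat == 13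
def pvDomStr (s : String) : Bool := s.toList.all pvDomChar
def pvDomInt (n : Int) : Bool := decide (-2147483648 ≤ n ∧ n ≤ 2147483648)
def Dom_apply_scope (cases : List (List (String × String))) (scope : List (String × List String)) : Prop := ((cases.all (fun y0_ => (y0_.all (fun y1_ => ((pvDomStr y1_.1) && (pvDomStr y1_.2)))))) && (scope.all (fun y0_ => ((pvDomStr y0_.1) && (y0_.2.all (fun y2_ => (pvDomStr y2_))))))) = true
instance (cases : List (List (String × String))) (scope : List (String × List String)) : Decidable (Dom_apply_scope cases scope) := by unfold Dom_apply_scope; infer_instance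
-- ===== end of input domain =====

-- B changes the shape only: one traversal with precomputed filter sets instead of A's
-- four sequential list rebuilds; same values on every input.

-- dict.get(k) on an association list: first match (shared dict semantics, both ports)
def pvGet {ν : Type} (d : List (String × ν)) (k : String) : Option ν :=
  List.lookup k d

-- truthiness of scope.get(key): a present, non-empty list (shared Python truth test)
def pvTruthyList (o : Option (List String)) : Bool :=
  match o with
  | some l => !l.isEmpty
  | none => false

-- ===== PORT A =====
-- A filters the automatable cases first, then rebuilds the list once per active dimension.
def apply_scope (cases : List (List (String × String))) (scope : List (String × List String)) : List (List (String × String)) :=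
  -- out = [c for c in cases if c.get("automatable", True)]  (string truthiness: non-empty)
  let out := cases.filter (fun c =>
    match pvGet c "automatable" with
    | none => true
    | some s => !(s == ""))
  -- if scope.get("priorities"): s = set(...); out = [c for c in out if c.get("priority") in s]
  let out := if pvTruthyList (pvGet scope "priorities") then
      let s := PySem.Set.ofList ((pvGet scope "priorities").getD [])
      out.filter (fun c =>
        match pvGet c "priority" with
        | some v => s.contains v
        | none => false)
    else out
  let out := if pvTruthyList (pvGet scope "types") then
      let s := PySem.Set.ofList ((pvGet scope "types").getD [])
      out.filter (fun c =>
        match pvGet c "type" with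
        | some v => s.contains v
        | none => false)
    else out
  let out := if pvTruthyList (pvGet scope "targets") then
      let s := PySem.Set.ofList ((pvGet scope "targets").getD [])
      out.filter (fun c =>
        match pvGet c "target" with
        | some v => s.contains v
        | none => false)
    else out
  out

-- ===== PORT B =====
-- set(scope[key]) if scope.get(key) else None
def pvActiveSet (scope : List (String × List String)) (key : String) : Option (PySem.Set String) :=
  if pvTruthyList (pvGet scope key) then
    some (PySem.Set.ofList ((pvGet scope key).getD []))
  else none

-- (s is None or c.get(field) in s)
def pvDimOk (s : Option (PySem.Set String)) (c : List (String × String)) (field : String) : Bool :=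
  match s with
  | none => true
  | some st =>
    match pvGet c field with
    | some v => st.contains v
    | none => false

-- B: one comprehension testing every dimension per element.
def apply_scope_alt (cases : List (List (String × String))) (scope : List (String × List String)) : List (List (String × String)) :=
  let prios := pvActiveSet scope "priorities"
  let types := pvActiveSet scope "types"
  let targets := pvActiveSet scope "targets"
  cases.filter (fun c =>
    (match pvGet c "automatable" with
     | none => true
     | some s => !(s == ""))
    && pvDimOk prios c "priority"
    && pvDimOk types c "type"
    && pvDimOk targets c "target")

-- ===== PRECONDITION & SPEC =====
def Spec_apply_scope (cases : List (List (String × String))) (scope : List (String × List String)) (out : List (List (String × String))) : Prop := out = apply_scope_alt cases scope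
instance (cases : List (List (String × String))) (scope : List (String × List String)) (out : List (List (String × String))) : Decidable (Spec_apply_scope cases scope out) := by unfold Spec_apply_scope; infer_instance

-- ===== CLAIM (what is proved, stated in full; the proofs are below) =====
def Claim_equal_apply_scope : Prop := ∀ (cases : List (List (String × String))) (scope : List (String × List String)), Dom_apply_scope cases scope → Spec_apply_scope cases scope (apply_scope cases scope)

-- ===== LEMMAS AND PROOFS =====

-- ===== VERDICT (by name: the statement is the Claim_ definition above) =====
theorem apply_scope_spec : Claim_equal_apply_scope := by
  intro cases scope _
  unfold Spec_apply_scope apply_scope apply_scope_alt pvActiveSet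
  by_cases hp : pvTruthyList (pvGet scope "priorities") = true <;>
  by_cases ht : pvTruthyList (pvGet scope "types") = true <;>
  by_cases hg : pvTruthyList (pvGet scope "targets") = true <;>
  simp only [hp, ht, hg, Bool.not_eq_true, if_neg, if_pos,
    List.filter_filter] <;>
  refine List.filter_congr (fun c _ => ?_) <;>
  simp [pvDimOk, Bool.and_assoc, Bool.and_comm, Bool.and_left_comm]
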